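-- pv_equiv track=rewrite | github.com/amitcjmu/Stock-Analysis | backend/app/services/tools/gap_analysis_tools.py | _determine_affected_strategies
-- ===== SOURCE A (Python) =====
-- from typing import Dict, Any, List, Optional, Tuple, ClassVar
--
-- def _determine_affected_strategies(attribute: str, category: str) -> List[str]:
--     """Determine which 6R strategies are affected by this gap"""
--     strategy_requirements = {
--         "rehost": ["hostname", "os_type", "os_version", "cpu_cores", "memory_gb",
--                   "storage_gb", "network_zone", "environment"],
--         "replatform": ["technology_stack", "os_type", "application_dependencies",
--                       "database_dependencies", "integration_points"],
--         "refactor": ["technology_stack", "application_type", "application_dependencies",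
--                     "database_dependencies", "data_flows", "criticality_level"],
--         "repurchase": ["application_name", "application_type", "criticality_level",
--                       "integration_points", "compliance_scope"],
--         "retire": ["application_name", "criticality_level", "owner",
--                   "application_dependencies", "cost_center"],
--         "retain": ["owner", "cost_center", "backup_strategy", "monitoring_status",
--                   "patch_level", "criticality_level"]
--     }
--
--     affected = []
--     for strategy, required_attrs in strategy_requirements.items():
--         if attribute in required_attrs:
--             affected.append(strategy)
--
--     return affected if affected else ["general"]
-- ===== SOURCE B (Python) =====
-- from typing import List
--
-- # Inverted table written directly: attribute -> 6R strategies that require it.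
-- _ATTR_INDEX = {
--     "hostname": ["rehost"],
--     "os_type": ["rehost", "replatform"],
--     "os_version": ["rehost"],
--     "cpu_cores": ["rehost"],
--     "memory_gb": ["rehost"],
--     "storage_gb": ["rehost"],
--     "network_zone": ["rehost"],
--     "environment": ["rehost"],
--     "technology_stack": ["replatform", "refactor"],
--     "application_dependencies": ["replatform", "refactor", "retire"],
--     "database_dependencies": ["replatform", "refactor"],
--     "integration_points": ["replatform", "repurchase"],
--     "application_type": ["refactor", "repurchase"],
--     "data_flows": ["refactor"],
--     "criticality_level": ["refactor", "repurchase", "retire", "retain"],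
--     "application_name": ["repurchase", "retire"],
--     "compliance_scope": ["repurchase"],
--     "owner": ["retire", "retain"],
--     "cost_center": ["retire", "retain"],
--     "backup_strategy": ["retain"],
--     "monitoring_status": ["retain"],
--     "patch_level": ["retain"],
-- }
--
--
-- def _determine_affected_strategies(attribute: str, category: str) -> List[str]:
--     """Determine which 6R strategies are affected by this gap"""
--     return list(_ATTR_INDEX.get(attribute, ["general"]))
-- ===== Notes on version B (the rewrite author's own statement) =====
-- stated objective: simpler
-- what changed: B replaces the per-call loop over the strategy->attributes table (with a list-membership test) by a directly written inverted attribute->strategies table, so the body is a single dict .get with default ['general'].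
import Mathlib
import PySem

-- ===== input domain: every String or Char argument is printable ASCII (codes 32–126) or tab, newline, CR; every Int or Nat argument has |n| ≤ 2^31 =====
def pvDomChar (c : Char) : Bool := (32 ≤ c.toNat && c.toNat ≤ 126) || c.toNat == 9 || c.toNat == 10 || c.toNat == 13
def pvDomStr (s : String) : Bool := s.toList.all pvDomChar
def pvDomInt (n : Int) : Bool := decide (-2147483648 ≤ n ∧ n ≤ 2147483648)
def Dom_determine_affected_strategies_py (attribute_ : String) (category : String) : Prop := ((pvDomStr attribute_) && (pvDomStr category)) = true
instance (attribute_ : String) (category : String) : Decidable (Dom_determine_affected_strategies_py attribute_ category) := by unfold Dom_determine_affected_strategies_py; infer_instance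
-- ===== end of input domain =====

-- B replaces A's per-call loop over the strategy->attributes table by a directly written
-- inverted attribute->strategies table, so the body is a single dict lookup (simpler).

-- ===== PORT A =====
-- A's local dict literal strategy_requirements
def pvStrategyReqs : List (String × List String) :=
  [("rehost", ["hostname", "os_type", "os_version", "cpu_cores", "memory_gb",
               "storage_gb", "network_zone", "environment"]),
   ("replatform", ["technology_stack", "os_type", "application_dependencies",
                   "database_dependencies", "integration_points"]),
   ("refactor", ["technology_stack", "application_type", "application_dependencies",
                 "database_dependencies", "data_flows", "criticality_level"]),
   ("repurchase", ["application_name", "application_type", "criticality_level",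
                   "integration_points", "compliance_scope"]),
   ("retire", ["application_name", "criticality_level", "owner",
               "application_dependencies", "cost_center"]),
   ("retain", ["owner", "cost_center", "backup_strategy", "monitoring_status",
               "patch_level", "criticality_level"])]

def determine_affected_strategies_py (attribute_ : String) (category : String) : List String :=
  let affected :=
    pvStrategyReqs.foldl
      (fun acc p => if attribute_ ∈ p.2 then acc ++ [p.1] else acc) []
  if affected = [] then ["general"] else affected

-- ===== PORT B =====
-- Source B's module-level dict literal _ATTR_INDEX (written out, not computed)
def pvAttrIndex : PySem.Dict String (List String) :=
  PySem.Dict.ofList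
    [("hostname", ["rehost"]),
     ("os_type", ["rehost", "replatform"]),
     ("os_version", ["rehost"]),
     ("cpu_cores", ["rehost"]),
     ("memory_gb", ["rehost"]),
     ("storage_gb", ["rehost"]),
     ("network_zone", ["rehost"]),
     ("environment", ["rehost"]),
     ("technology_stack", ["replatform", "refactor"]),
     ("application_dependencies", ["replatform", "refactor", "retire"]),
     ("database_dependencies", ["replatform", "refactor"]),
     ("integration_points", ["replatform", "repurchase"]),
     ("application_type", ["refactor", "repurchase"]),
     ("data_flows", ["refactor"]),
     ("criticality_level", ["refactor", "repurchase", "retire", "retain"]),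
     ("application_name", ["repurchase", "retire"]),
     ("compliance_scope", ["repurchase"]),
     ("owner", ["retire", "retain"]),
     ("cost_center", ["retire", "retain"]),
     ("backup_strategy", ["retain"]),
     ("monitoring_status", ["retain"]),
     ("patch_level", ["retain"])]

def determine_affected_strategies_py_alt (attribute_ : String) (category : String) : List String :=
  pvAttrIndex.getD attribute_ ["general"]

-- ===== PRECONDITION & SPEC =====
def Spec_determine_affected_strategies_py (attribute_ : String) (category : String) (out : List String) : Prop := out = determine_affected_strategies_py_alt attribute_ category
instance (attribute_ : String) (category : String) (out : List String) : Decidable (Spec_determine_affected_strategies_py attribute_ category out) := by unfold Spec_determine_affected_strategies_py; infer_instance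

-- ===== CLAIM (what is proved, stated in full; the proofs are below) =====
def Claim_equal_determine_affected_strategies_py : Prop := ∀ (attribute_ : String) (category : String), Dom_determine_affected_strategies_py attribute_ category → Spec_determine_affected_strategies_py attribute_ category (determine_affected_strategies_py attribute_ category)

-- ===== LEMMAS AND PROOFS =====

-- pvAttrIndex in kernel-normal form (the ofList build evaluated once)
theorem pvAttrIndex_eq : pvAttrIndex = PySem.Dict.mk
    [("hostname", ["rehost"]), ("os_type", ["rehost", "replatform"]), ("os_version", ["rehost"]),
     ("cpu_cores", ["rehost"]), ("memory_gb", ["rehost"]), ("storage_gb", ["rehost"]),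
     ("network_zone", ["rehost"]), ("environment", ["rehost"]),
     ("technology_stack", ["replatform", "refactor"]),
     ("application_dependencies", ["replatform", "refactor", "retire"]),
     ("database_dependencies", ["replatform", "refactor"]),
     ("integration_points", ["replatform", "repurchase"]),
     ("application_type", ["refactor", "repurchase"]), ("data_flows", ["refactor"]),
     ("criticality_level", ["refactor", "repurchase", "retire", "retain"]),
     ("application_name", ["repurchase", "retire"]), ("compliance_scope", ["repurchase"]),
     ("owner", ["retire", "retain"]), ("cost_center", ["retire", "retain"]),
     ("backup_strategy", ["retain"]), ("monitoring_status", ["retain"]),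
     ("patch_level", ["retain"])] := by
  apply PySem.Dict.ext
  unfold pvAttrIndex PySem.Dict.ofList
  rw [show ∀ (d : PySem.Dict String (List String)) l, d.update l =
        l.foldl (fun d p => d.insert p.1 p.2) d from fun _ _ => rfl]
  rw [PySem.Dict.items_foldl_insert_fresh (k := Prod.fst) (v := Prod.snd)]
  · rfl
  · intro a _; rfl
  · decide

-- all distinct attributes occurring anywhere in pvStrategyReqs (= the keys of pvAttrIndex)
def pvAllAttrs : List String :=
  ["hostname", "os_type", "os_version", "cpu_cores", "memory_gb", "storage_gb",
   "network_zone", "environment", "technology_stack", "application_dependencies",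
   "database_dependencies", "integration_points", "application_type", "data_flows",
   "criticality_level", "application_name", "compliance_scope", "owner",
   "cost_center", "backup_strategy", "monitoring_status", "patch_level"]

set_option maxRecDepth 20000 in
theorem pv_eq_of_mem (a : String) (h : a ∈ pvAllAttrs) :
    ∀ c, determine_affected_strategies_py a c = determine_affected_strategies_py_alt a c := by
  have halt : ∀ x c, determine_affected_strategies_py_alt x c =
      (PySem.Dict.getD { items :=
        [("hostname", ["rehost"]), ("os_type", ["rehost", "replatform"]), ("os_version", ["rehost"]),
         ("cpu_cores", ["rehost"]), ("memory_gb", ["rehost"]), ("storage_gb", ["rehost"]),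
         ("network_zone", ["rehost"]), ("environment", ["rehost"]),
         ("technology_stack", ["replatform", "refactor"]),
         ("application_dependencies", ["replatform", "refactor", "retire"]),
         ("database_dependencies", ["replatform", "refactor"]),
         ("integration_points", ["replatform", "repurchase"]),
         ("application_type", ["refactor", "repurchase"]), ("data_flows", ["refactor"]),
         ("criticality_level", ["refactor", "repurchase", "retire", "retain"]),
         ("application_name", ["repurchase", "retire"]), ("compliance_scope", ["repurchase"]),
         ("owner", ["retire", "retain"]), ("cost_center", ["retire", "retain"]),
         ("backup_strategy", ["retain"]), ("monitoring_status", ["retain"]),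
         ("patch_level", ["retain"])] } x ["general"]) := by
    intro x c
    unfold determine_affected_strategies_py_alt
    rw [pvAttrIndex_eq]
  fin_cases h <;> intro c <;> rw [halt] <;> rfl

theorem pv_eq_of_not_mem (a : String) (h : a ∉ pvAllAttrs) :
    ∀ c, determine_affected_strategies_py a c = determine_affected_strategies_py_alt a c := by
  intro c
  simp only [pvAllAttrs, List.mem_cons, List.not_mem_nil, or_false, not_or] at h
  obtain ⟨h1, h2, h3, h4, h5, h6, h7, h8, h9, h10, h11, h12, h13, h14, h15, h16,
    h17, h18, h19, h20, h21, h22⟩ := h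
  unfold determine_affected_strategies_py determine_affected_strategies_py_alt
  rw [pvAttrIndex_eq]
  simp [pvStrategyReqs, PySem.Dict.getD, PySem.Dict.get?, List.foldl, List.find?,
    h1, h2, h3, h4, h5, h6, h7, h8, h9, h10, h11, h12, h13, h14, h15, h16,
    h17, h18, h19, h20, h21, h22,
    beq_eq_false_iff_ne.mpr (Ne.symm h1), beq_eq_false_iff_ne.mpr (Ne.symm h2), beq_eq_false_iff_ne.mpr (Ne.symm h3), beq_eq_false_iff_ne.mpr (Ne.symm h4), beq_eq_false_iff_ne.mpr (Ne.symm h5), beq_eq_false_iff_ne.mpr (Ne.symm h6), beq_eq_false_iff_ne.mpr (Ne.symm h7), beq_eq_false_iff_ne.mpr (Ne.symm h8), beq_eq_false_iff_ne.mpr (Ne.symm h9), beq_eq_false_iff_ne.mpr (Ne.symm h10), beq_eq_false_iff_ne.mpr (Ne.symm h11), beq_eq_false_iff_ne.mpr (Ne.symm h12), beq_eq_false_iff_ne.mpr (Ne.symm h13), beq_eq_false_iff_ne.mpr (Ne.symm h14), beq_eq_false_iff_ne.mpr (Ne.symm h15), beq_eq_false_iff_ne.mpr (Ne.symm h16), beq_eq_false_iff_ne.mpr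 (Ne.symm h17), beq_eq_false_iff_ne.mpr (Ne.symm h18), beq_eq_false_iff_ne.mpr (Ne.symm h19), beq_eq_false_iff_ne.mpr (Ne.symm h20), beq_eq_false_iff_ne.mpr (Ne.symm h21), beq_eq_false_iff_ne.mpr (Ne.symm h22)]

-- ===== VERDICT (by name: the statement is the Claim_ definition above) =====
theorem determine_affected_strategies_py_spec : Claim_equal_determine_affected_strategies_py := by
  intro a c _
  unfold Spec_determine_affected_strategies_py
  by_cases h : a ∈ pvAllAttrs
  · exact pv_eq_of_mem a h c
  · exact pv_eq_of_not_mem a h c
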